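-- pv_equiv track=rewrite | github.com/spirinvadim/MixDAIseg | src/simple/HMM.py | get_HMM_tracts
-- ===== SOURCE A (Python) =====
-- N=2
--
-- def get_HMM_tracts(seq):
--     migrating_tracts = []
--     for i in range(N):
--         migrating_tracts.append([])
--     start=0
--     for i in range(1,len(seq)):
--         if seq[i]!=seq[i-1]:
--             migrating_tracts[seq[i-1]].append([start,i-1])
--             start=i
--     migrating_tracts[seq[len(seq)-1]].append([start,len(seq)-1])
--     return migrating_tracts
-- ===== SOURCE B (Python) =====
-- N = 2
--
-- def get_HMM_tracts(seq):
--     # boundary-based: collect change points first, then emit one tract per boundary pair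
--     b = [0] + [i for i in range(1, len(seq)) if seq[i] != seq[i - 1]] + [len(seq)]
--     tracts = [[] for _ in range(N)]
--     for k in range(len(b) - 1):
--         s = b[k]
--         e = b[k + 1] - 1
--         tracts[seq[s]].append([s, e])
--     return tracts
-- ===== Notes on version B (the rewrite author's own statement) =====
-- stated objective: alternative
-- what changed: B first builds the boundary list of change points and then emits one tract per consecutive boundary pair into the per-state lists, instead of A's single scan carrying a running start and doing a trailing final append.
import Mathlib
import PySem

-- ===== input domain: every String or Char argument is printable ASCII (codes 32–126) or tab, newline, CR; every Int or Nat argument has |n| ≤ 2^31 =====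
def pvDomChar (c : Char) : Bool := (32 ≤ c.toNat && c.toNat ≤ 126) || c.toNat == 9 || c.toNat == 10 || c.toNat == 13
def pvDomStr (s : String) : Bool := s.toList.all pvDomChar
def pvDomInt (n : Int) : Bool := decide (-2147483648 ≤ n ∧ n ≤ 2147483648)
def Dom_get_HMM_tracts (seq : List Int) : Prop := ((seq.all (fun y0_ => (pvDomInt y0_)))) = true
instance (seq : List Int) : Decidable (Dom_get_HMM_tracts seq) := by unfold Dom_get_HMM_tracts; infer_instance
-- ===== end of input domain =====

-- B groups the sequence by first computing the change-point boundary list and then emitting one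
-- tract per boundary pair (objective: alternative decomposition, same linear cost); equal to A's
-- running-scan on every input where A returns (nonempty seq, labels valid indices of a 2-list).

-- ===== PORT A =====
-- Python list indexing into the length-2 tract list (N = 2): negative labels wrap (exact for -2 ≤ x < 2)
def pvIdx2 (x : Int) : Nat := if x < 0 then (x + 2).toNat else x.toNat
-- `migrating_tracts[lab].append(run)` on the length-2 tract list
def pvPush (t : List (List (List Int))) (lab : Int) (run : List Int) : List (List (List Int)) :=
  t.set (pvIdx2 lab) (t.getD (pvIdx2 lab) [] ++ [run])

def get_HMM_tracts (seq : List Int) : List (List (List Int)) :=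
  let n := seq.length
  let st := (List.range' 1 (n - 1)).foldl
    (fun (p : List (List (List Int)) × Nat) i =>
      if seq.getD i 0 ≠ seq.getD (i - 1) 0 then
        (pvPush p.1 (seq.getD (i - 1) 0) [(p.2 : Int), (i : Int) - 1], i)
      else p) ([[], []], 0)
  pvPush st.1 (seq.getD (n - 1) 0) [(st.2 : Int), (n : Int) - 1]

-- ===== PORT B =====
def get_HMM_tracts_alt (seq : List Int) : List (List (List Int)) :=
  let n := seq.length
  let b : List Nat :=
    0 :: ((List.range' 1 (n - 1)).filter (fun i => decide (seq.getD i 0 ≠ seq.getD (i - 1) 0)) ++ [n])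
  (List.range (b.length - 1)).foldl
    (fun t k =>
      let s := b.getD k 0
      let e : Int := (b.getD (k + 1) 0 : Int) - 1
      pvPush t (seq.getD s 0) [(s : Int), e]) [[], []]

-- ===== PRECONDITION & SPEC =====
-- Pre_ excludes exactly the inputs on which Python A raises IndexError: the empty list
-- (seq[-1] lookup) and lists containing a label outside -2 ≤ x < 2 (invalid index into the
-- length-2 tract list).
def Pre_get_HMM_tracts (seq : List Int) : Prop :=
  seq ≠ [] ∧ ∀ x ∈ seq, -2 ≤ x ∧ x < 2
instance (seq : List Int) : Decidable (Pre_get_HMM_tracts seq) := by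
  unfold Pre_get_HMM_tracts; infer_instance
def pvWitness_get_HMM_tracts : List Int := ([0, 1, 1, 0] : List Int)
def Spec_get_HMM_tracts (seq : List Int) (out : List (List (List Int))) : Prop := out = get_HMM_tracts_alt seq
instance (seq : List Int) (out : List (List (List Int))) : Decidable (Spec_get_HMM_tracts seq out) := by unfold Spec_get_HMM_tracts; infer_instance

-- ===== CLAIM (what is proved, stated in full; the proofs are below) =====
def Claim_equal_get_HMM_tracts : Prop := ∀ (seq : List Int), Dom_get_HMM_tracts seq → Pre_get_HMM_tracts seq → Spec_get_HMM_tracts seq (get_HMM_tracts seq)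

-- ===== LEMMAS AND PROOFS =====

-- within a run (no change points in (s, a)), the label at s equals the label at a-1
lemma pvConst (seq : List Int) : ∀ (a s : Nat), s < a →
    (∀ j, s < j → j < a → seq.getD j 0 = seq.getD (j - 1) 0) →
    seq.getD s 0 = seq.getD (a - 1) 0 := by
  intro a
  induction a with
  | zero => intro s h; omega
  | succ a ih =>
    intro s hlt hc
    rcases Nat.lt_or_ge s a with h | h
    · have hs : seq.getD s 0 = seq.getD (a - 1) 0 :=
        ih s h (fun j h1 h2 => hc j h1 (by omega))
      have ha : seq.getD a 0 = seq.getD (a - 1) 0 := hc a h (by omega)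
      simpa [Nat.add_sub_cancel] using hs.trans ha.symm
    · have : s = a := by omega
      subst this
      simp

-- B's indexed fold over the boundary list equals a fold over consecutive pairs
lemma pvRangeZip {T : Type} (f : T → Nat → Nat → T) :
    ∀ (b : List Nat) (t : T),
      (List.range (b.length - 1)).foldl (fun t k => f t (b.getD k 0) (b.getD (k + 1) 0)) t
      = (b.zip b.tail).foldl (fun t p => f t p.1 p.2) t := by
  intro b
  induction b with
  | nil => intro t; simp
  | cons x rest ih =>
    intro t
    cases rest with
    | nil => simp
    | cons y r =>
      have h1 : (x :: y :: r : List Nat).length - 1 = r.length + 1 := by simp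
      rw [h1, List.range_succ_eq_map]
      simp only [List.foldl_cons, List.foldl_map]
      have h2 : ∀ (t : T),
          (List.range r.length).foldl
            (fun t k => f t ((x :: y :: r : List Nat).getD (k + 1) 0) ((x :: y :: r : List Nat).getD (k + 1 + 1) 0)) t
          = (List.range ((y :: r : List Nat).length - 1)).foldl
            (fun t k => f t ((y :: r : List Nat).getD k 0) ((y :: r : List Nat).getD (k + 1) 0)) t := by
        intro t; simp
      have hx : (x :: y :: r : List Nat).getD 0 0 = x := rfl
      have hy : (x :: y :: r : List Nat).getD (0 + 1) 0 = y := rfl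
      rw [hx, hy, h2, ih (f t x y)]
      simp

-- main invariant: A's running scan from state (t, s) over indices [a, a+k) plus its final push
-- equals B's pair-fold over s :: change-points ++ [a+k], provided no change point lies in (s, a)
lemma pvMain (seq : List Int) : ∀ (k a s : Nat) (t : List (List (List Int))),
    s < a →
    (∀ j, s < j → j < a → seq.getD j 0 = seq.getD (j - 1) 0) →
    (let st := (List.range' a k).foldl
        (fun (p : List (List (List Int)) × Nat) i =>
          if seq.getD i 0 ≠ seq.getD (i - 1) 0 then
            (pvPush p.1 (seq.getD (i - 1) 0) [(p.2 : Int), (i : Int) - 1], i)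
          else p) (t, s)
     pvPush st.1 (seq.getD (a + k - 1) 0) [(st.2 : Int), ((a + k : Nat) : Int) - 1])
    = (((s :: ((List.range' a k).filter (fun i => decide (seq.getD i 0 ≠ seq.getD (i - 1) 0)) ++ [a + k])).zip
        ((List.range' a k).filter (fun i => decide (seq.getD i 0 ≠ seq.getD (i - 1) 0)) ++ [a + k])).foldl
        (fun t p => pvPush t (seq.getD p.1 0) [(p.1 : Int), (p.2 : Int) - 1]) t) := by
  intro k
  induction k with
  | zero =>
    intro a s t hlt hc
    simp only [List.range'_zero, List.foldl_nil, List.filter_nil, List.nil_append,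
      List.zip_cons_cons, List.zip_nil_right, List.foldl_cons, List.foldl_nil, Nat.add_zero]
    rw [pvConst seq a s hlt hc]
  | succ k ih =>
    intro a s t hlt hc
    rw [List.range'_succ]
    by_cases hch : seq.getD a 0 = seq.getD (a - 1) 0
    · -- no change at a: A's fold skips, B's filter drops a
      have hd : ¬ ((decide (seq.getD a 0 ≠ seq.getD (a - 1) 0)) = true) := by
        simp only [decide_eq_true_eq]; exact not_not_intro hch
      rw [List.foldl_cons, if_neg (by simpa using hch), List.filter_cons, if_neg hd]
      have hinv : ∀ j, s < j → j < a + 1 → seq.getD j 0 = seq.getD (j - 1) 0 := by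
        intro j h1 h2
        rcases Nat.lt_or_ge j a with h | h
        · exact hc j h1 h
        · have : j = a := by omega
          subst this; exact hch
      have hstep := ih (a + 1) s t (by omega) hinv
      have harr : a + 1 + k = a + (k + 1) := by omega
      rw [harr] at hstep
      exact hstep
    · -- change at a: A pushes the finished run, B's filter keeps a
      have hd : (decide (seq.getD a 0 ≠ seq.getD (a - 1) 0)) = true := by
        simp only [decide_eq_true_eq]; exact hch
      rw [List.foldl_cons, if_pos hch, List.filter_cons, if_pos hd]
      have hlab : seq.getD (a - 1) 0 = seq.getD s 0 := (pvConst seq a s hlt hc).symm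
      rw [hlab]
      simp only [List.cons_append, List.zip_cons_cons, List.foldl_cons]
      have hstep := ih (a + 1) a (pvPush t (seq.getD s 0) [(s : Int), (a : Int) - 1])
        (by omega) (by intro j h1 h2; omega)
      have harr : a + 1 + k = a + (k + 1) := by omega
      rw [harr] at hstep
      exact hstep

-- ===== VERDICT (by name: the statement is the Claim_ definition above) =====
theorem get_HMM_tracts_spec : Claim_equal_get_HMM_tracts := by
  intro seq _ hpre
  unfold Spec_get_HMM_tracts get_HMM_tracts get_HMM_tracts_alt
  obtain ⟨hne, -⟩ := hpre
  have hn : 1 ≤ seq.length := by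
    cases seq with
    | nil => exact absurd rfl hne
    | cons x xs => simp
  have hmain := pvMain seq (seq.length - 1) 1 0 [[], []] (by omega) (by intro j h1 h2; omega)
  have hlen : 1 + (seq.length - 1) = seq.length := by omega
  rw [hlen] at hmain
  simp only at hmain ⊢
  rw [hmain, pvRangeZip (fun t s e => pvPush t (seq.getD s 0) [(s : Int), (e : Int) - 1])]
  simp [Int.sub_eq_add_neg]
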